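-- pv_equiv track=rewrite | github.com/punt-labs/biff | src/biff/_stdlib.py | sanitize_repo_name
-- ===== SOURCE A (Python) =====
-- def sanitize_repo_name(name: str) -> str:
--     """Sanitize a repo name or slug for use in NATS resource names.
--
--     NATS bucket names allow ASCII alphanumeric, dash, and underscore
--     only.  Subject dots are level separators; wildcards (``*``, ``>``)
--     are reserved.  Slashes become double underscores (``__``) to mark
--     the owner/repo boundary without colliding with underscores in repo
--     names; dots become dashes; spaces become dashes; non-ASCII and
--     remaining special characters are stripped.
--
--     Raises ``SystemExit`` if the result is empty — a repo name that
--     sanitizes to nothing would silently share a NATS namespace with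
--     other unusable names, causing the exact collision this function
--     exists to prevent.
--     """
--     clean = name.replace("/", "__").replace(".", "-").replace(" ", "-")
--     sanitized = "".join(c for c in clean if (c.isascii() and c.isalnum()) or c in "-_")
--     if not sanitized:
--         raise SystemExit(
--             f"Repo name {name!r} contains no usable characters after sanitization.\n"
--             "Rename the directory to include ASCII letters or digits."
--         )
--     return sanitized
-- ===== SOURCE B (Python) =====
-- def sanitize_repo_name(name: str) -> str:
--     """Single-pass sanitizer: one loop over the original name instead of
--     three replace scans plus a filter comprehension."""
--     parts = []
--     for c in name:
--         if c == "/":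
--             parts.append("__")
--         elif c == "." or c == " ":
--             parts.append("-")
--         elif (c.isascii() and c.isalnum()) or c in "-_":
--             parts.append(c)
--     sanitized = "".join(parts)
--     if not sanitized:
--         raise SystemExit(
--             f"Repo name {name!r} contains no usable characters after sanitization.\n"
--             "Rename the directory to include ASCII letters or digits."
--         )
--     return sanitized
-- ===== Notes on version B (the rewrite author's own statement) =====
-- stated objective: simpler
-- what changed: Replaces A's three chained full replace scans plus a filter comprehension with one single pass over the original string that maps each character directly to its output ('/'->'__', '.'/' '->'-', keep ASCII alnum/-/_, drop the rest).
import Mathlib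
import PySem

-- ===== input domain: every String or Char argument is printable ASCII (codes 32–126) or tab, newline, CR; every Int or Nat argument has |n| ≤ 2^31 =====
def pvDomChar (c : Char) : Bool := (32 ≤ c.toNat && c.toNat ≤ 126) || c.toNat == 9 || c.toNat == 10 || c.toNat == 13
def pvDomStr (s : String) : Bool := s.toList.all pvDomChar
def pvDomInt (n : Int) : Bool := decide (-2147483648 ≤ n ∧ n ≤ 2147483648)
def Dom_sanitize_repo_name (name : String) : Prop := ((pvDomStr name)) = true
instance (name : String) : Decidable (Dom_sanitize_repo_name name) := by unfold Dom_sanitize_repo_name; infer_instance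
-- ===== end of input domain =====

-- B folds A's three replace passes + filter into ONE per-character pass over the
-- original name (objective: simpler). Equivalence of the RETURN value is proved on
-- Pre_ (inputs where A does not raise SystemExit).

-- ===== PORT A =====
-- keep test of A's comprehension: (c.isascii() and c.isalnum()) or c in "-_"
def pvKeepA (c : Char) : Bool :=
  (decide (c.toNat < 128) && PySem.Chars.isalnum c) || c = '-' || c = '_'

def sanitize_repo_name (name : String) : String :=
  let clean := PySem.Str.replace (PySem.Str.replace (PySem.Str.replace name "/" "__") "." "-") " " "-"
  String.ofList (clean.toList.filter pvKeepA)

-- ===== PORT B =====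
-- what B's loop body appends for one character (as a list of chars)
def pvMapB (c : Char) : List Char :=
  if c = '/' then ['_', '_']
  else if c = '.' ∨ c = ' ' then ['-']
  else if (decide (c.toNat < 128) && PySem.Chars.isalnum c) || c = '-' || c = '_' then [c]
  else []

def sanitize_repo_name_alt (name : String) : String :=
  String.ofList (name.toList.flatMap pvMapB)

-- ===== PRECONDITION & SPEC =====
-- Pre_ excludes exactly the inputs on which A raises SystemExit (the sanitized
-- result is empty); B raises the same SystemExit there.
def Pre_sanitize_repo_name (name : String) : Prop :=
  (name.toList.any (fun c => c = '/' ∨ c = '.' ∨ c = ' ' ∨ pvKeepA c)) = true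
instance (name : String) : Decidable (Pre_sanitize_repo_name name) := by
  unfold Pre_sanitize_repo_name; infer_instance

def pvWitness_sanitize_repo_name : String := "my.repo/Name 1"

def Spec_sanitize_repo_name (name : String) (out : String) : Prop := out = sanitize_repo_name_alt name
instance (name : String) (out : String) : Decidable (Spec_sanitize_repo_name name out) := by unfold Spec_sanitize_repo_name; infer_instance

-- ===== CLAIM (what is proved, stated in full; the proofs are below) =====
def Claim_equal_sanitize_repo_name : Prop := ∀ (name : String), Dom_sanitize_repo_name name → Pre_sanitize_repo_name name → Spec_sanitize_repo_name name (sanitize_repo_name name)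

-- ===== LEMMAS AND PROOFS =====

-- single-character replace is a flatMap
theorem pv_replace_go_single (p : Char) (new : List Char) :
    ∀ (fuel : Nat) (l acc : List Char), l.length ≤ fuel →
      PySem.Chars.replace.go [p] new fuel l acc =
        acc.reverse ++ l.flatMap (fun c => if c = p then new else [c]) := by
  intro fuel
  induction fuel with
  | zero =>
    intro l acc h
    have : l = [] := List.length_eq_zero_iff.mp (Nat.le_zero.mp h)
    subst this
    simp [PySem.Chars.replace.go]
  | succ n ih =>
    intro l acc h
    cases l with
    | nil => simp [PySem.Chars.replace.go]
    | cons c t =>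
      by_cases hc : c = p
      · subst hc
        have hpre : List.isPrefixOf [c] (c :: t) = true := by
          simp [List.isPrefixOf]
        rw [PySem.Chars.replace.go]
        simp only [hpre, if_true]
        rw [show List.drop [c].length (c :: t) = t from rfl,
          ih t (new.reverse ++ acc) (by simpa using Nat.le_of_succ_le_succ h)]
        simp
      · have hpre : List.isPrefixOf [p] (c :: t) = false := by
          simp [List.isPrefixOf]; exact fun h' => absurd h'.symm hc
        rw [PySem.Chars.replace.go]
        simp only [hpre, Bool.false_eq_true, if_false]
        rw [ih t (c :: acc) (by simpa using Nat.le_of_succ_le_succ h)]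
        simp [hc]

theorem pv_replace_single (p : Char) (new s : List Char) :
    PySem.Chars.replace s [p] new = s.flatMap (fun c => if c = p then new else [c]) := by
  rw [PySem.Chars.replace]
  simp only [List.isEmpty_cons, Bool.false_eq_true, if_false]
  simpa using pv_replace_go_single p new s.length s [] (le_refl _)

-- per-character agreement of A's pipeline with B's map
theorem pv_char_eq (c : Char) :
    ((if c = '/' then ['_', '_'] else [c]).flatMap
        (fun b => (if b = '.' then ['-'] else [b]).flatMap
          (fun d => if d = ' ' then ['-'] else [d]))).filter pvKeepA = pvMapB c := by
  by_cases h1 : c = '/'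
  · subst h1; decide
  by_cases h2 : c = '.'
  · subst h2; decide
  by_cases h3 : c = ' '
  · subst h3; decide
  have hm : pvMapB c = if pvKeepA c then [c] else [] := by
    unfold pvMapB pvKeepA
    rw [if_neg h1, if_neg (show ¬(c = '.' ∨ c = ' ') from by tauto)]
  rw [if_neg h1, hm]
  simp only [List.flatMap_cons, List.flatMap_nil, List.append_nil, if_neg h2, if_neg h3,
    List.filter]
  by_cases hk : pvKeepA c <;> simp [hk]

-- ===== VERDICT (by name: the statement is the Claim_ definition above) =====
theorem sanitize_repo_name_spec : Claim_equal_sanitize_repo_name := by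
  intro name _ _
  unfold Spec_sanitize_repo_name sanitize_repo_name sanitize_repo_name_alt
  refine congrArg String.ofList ?_
  rw [PySem.Str.toList_replace, PySem.Str.toList_replace, PySem.Str.toList_replace,
    show ("/".toList) = ['/'] from by decide, show ("__".toList) = ['_','_'] from by decide,
    show (".".toList) = ['.'] from by decide, show ("-".toList) = ['-'] from by decide,
    show (" ".toList) = [' '] from by decide]
  rw [pv_replace_single, pv_replace_single, pv_replace_single,
    List.flatMap_assoc, List.flatMap_assoc, List.filter_flatMap]
  exact List.flatMap_congr (fun c _ => pv_char_eq c)
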